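-- pv_equiv track=rewrite | github.com/Sallyrideauto/codetree-TILs | 241124/1차원 폭발 게임/The-1D-bomb-game.py | collapse_bombs
-- ===== SOURCE A (Python) =====
-- def collapse_bombs(n, m, bombs):
--     # To simulate gravity, we use a list to represent the stack of bombs.
--     stack = []
--
--     for bomb in bombs:
--         stack.append(bomb)
--
--         # Check if the latest added bomb causes any explosion.
--         while True:
--             # Traverse the stack to identify consecutive segments of the same bomb value
--             temp_stack = []
--             i = 0
--             while i < len(stack):
--                 j = i
--                 while j < len(stack) and stack[j] == stack[i]:
--                     j += 1
--                 # If the length of the segment is greater than or equal to m, skip adding to temp_stack (simulate explosion)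
--                 if j - i >= m:
--                     i = j
--                 else:
--                     temp_stack.extend(stack[i:j])
--                     i = j
--
--             # If no change, break the loop
--             if len(temp_stack) == len(stack):
--                 break
--             else:
--                 stack = temp_stack
--
--     return stack
-- ===== SOURCE B (Python) =====
-- def collapse_bombs(n, m, bombs):
--     # Run-length encoded stack: one pass, pop a run as soon as its count reaches m.
--     runs = []  # list of [value, count], top at the end
--     for b in bombs:
--         if runs and runs[-1][0] == b:
--             runs[-1][1] += 1
--         else:
--             runs.append([b, 1])
--         if runs[-1][1] >= m:
--             runs.pop()
--     out = []
--     for v, c in runs: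
--         out.extend([v] * c)
--     return out
-- ===== Notes on version B (the rewrite author's own statement) =====
-- stated objective: faster
-- what changed: Replaces A's repeated full-stack segment re-scans after every push by a run-length-encoded stack of (value,count) pairs updated once per bomb (a run is popped the moment its count reaches m), expanded to the plain stack at the end.
import Mathlib
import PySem

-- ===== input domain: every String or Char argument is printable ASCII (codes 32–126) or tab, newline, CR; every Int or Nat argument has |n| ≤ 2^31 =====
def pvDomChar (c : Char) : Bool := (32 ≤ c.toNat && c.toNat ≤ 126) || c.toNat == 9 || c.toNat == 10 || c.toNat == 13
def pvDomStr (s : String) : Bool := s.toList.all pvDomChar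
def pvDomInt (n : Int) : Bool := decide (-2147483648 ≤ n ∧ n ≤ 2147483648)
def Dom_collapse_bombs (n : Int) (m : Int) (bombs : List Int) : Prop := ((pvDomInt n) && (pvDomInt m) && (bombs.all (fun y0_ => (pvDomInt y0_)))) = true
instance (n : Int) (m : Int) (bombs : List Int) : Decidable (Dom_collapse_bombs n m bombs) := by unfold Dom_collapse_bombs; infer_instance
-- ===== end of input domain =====

-- B replaces A's repeated full-stack re-scans after every push by a run-length-encoded
-- stack updated once per bomb (pop a run as soon as its count reaches m); objective: faster.

-- ===== PORT A =====
-- A's inner index loop (i, j) over the stack, peeling one maximal run per step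
def pvPassA (m : Int) : List Int → List Int
  | [] => []
  | x :: xs =>
    if ((List.takeWhile (fun y => y == x) (x :: xs)).length : Int) ≥ m then
      pvPassA m (List.dropWhile (fun y => y == x) (x :: xs))
    else
      List.takeWhile (fun y => y == x) (x :: xs)
        ++ pvPassA m (List.dropWhile (fun y => y == x) (x :: xs))
termination_by l => l.length
decreasing_by
  all_goals
    simp only [List.dropWhile_cons, beq_self_eq_true, if_true]
    exact Nat.lt_succ_of_le (List.length_dropWhile_le _ _)

theorem pvPassA_cons (m x : Int) (xs : List Int) :
    pvPassA m (x :: xs)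
      = if ((List.takeWhile (fun y => y == x) (x :: xs)).length : Int) ≥ m then
          pvPassA m (List.dropWhile (fun y => y == x) (x :: xs))
        else
          List.takeWhile (fun y => y == x) (x :: xs)
            ++ pvPassA m (List.dropWhile (fun y => y == x) (x :: xs)) := by
  rw [pvPassA.eq_def]

-- needed by pvLoopA's termination argument
theorem pvPassA_length_le_fuel (m : Int) :
    ∀ (k : Nat) (l : List Int), l.length ≤ k → (pvPassA m l).length ≤ l.length := by
  intro k
  induction k with
  | zero =>
    intro l hl
    have : l = [] := by cases l <;> simp_all
    subst this; simp [pvPassA]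
  | succ k ih =>
    intro l hl
    cases l with
    | nil => simp [pvPassA]
    | cons x xs =>
      rw [pvPassA_cons]
      have hdrop : List.dropWhile (fun y => y == x) (x :: xs)
          = List.dropWhile (fun y => y == x) xs := by
        simp [List.dropWhile_cons]
      have hlen : (List.takeWhile (fun y => y == x) (x :: xs)).length
          + (List.dropWhile (fun y => y == x) (x :: xs)).length = (x :: xs).length := by
        rw [← List.length_append, List.takeWhile_append_dropWhile]
      have hle : (List.dropWhile (fun y => y == x) (x :: xs)).length ≤ k := by
        rw [hdrop]
        have := List.length_dropWhile_le (p := fun y => y == x) (l := xs)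
        simp at hl; omega
      have hrec := ih (List.dropWhile (fun y => y == x) (x :: xs)) hle
      split
      · calc (pvPassA m (List.dropWhile (fun y => y == x) (x :: xs))).length
            ≤ (List.dropWhile (fun y => y == x) (x :: xs)).length := hrec
          _ ≤ (x :: xs).length := by omega
      · simp only [List.length_append]; omega

theorem pvPassA_length_le (m : Int) (l : List Int) : (pvPassA m l).length ≤ l.length :=
  pvPassA_length_le_fuel m l.length l le_rfl

-- A's 'while True' fixpoint loop: rebuild until a pass changes nothing
def pvLoopA (m : Int) (stack : List Int) : List Int :=
  let t := pvPassA m stack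
  if t.length = stack.length then stack else pvLoopA m t
termination_by stack.length
decreasing_by
  simp only [t] at *
  have := pvPassA_length_le m stack
  omega

def collapse_bombs (n : Int) (m : Int) (bombs : List Int) : List Int :=
  bombs.foldl (fun stack bomb => pvLoopA m (stack ++ [bomb])) []

-- ===== PORT B =====
-- one iteration of B's loop over a run-length-encoded stack (runs[-1] → getLast?, pop → dropLast)
def pvStepB (m : Int) (runs : List (Int × Int)) (b : Int) : List (Int × Int) :=
  let runs' :=
    match runs.getLast? with
    | some (v, c) => if v = b then runs.dropLast ++ [(v, c + 1)] else runs ++ [(b, 1)]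
    | none => [(b, 1)]
  match runs'.getLast? with
  | some (_, c) => if c ≥ m then runs'.dropLast else runs'
  | none => []

def collapse_bombs_alt (n : Int) (m : Int) (bombs : List Int) : List Int :=
  (bombs.foldl (pvStepB m) []).flatMap (fun p => List.replicate p.2.toNat p.1)

-- ===== PRECONDITION & SPEC =====
def Spec_collapse_bombs (n : Int) (m : Int) (bombs : List Int) (out : List Int) : Prop := out = collapse_bombs_alt n m bombs
instance (n : Int) (m : Int) (bombs : List Int) (out : List Int) : Decidable (Spec_collapse_bombs n m bombs out) := by unfold Spec_collapse_bombs; infer_instance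

-- ===== CLAIM (what is proved, stated in full; the proofs are below) =====
def Claim_equal_collapse_bombs : Prop := ∀ (n : Int) (m : Int) (bombs : List Int), Dom_collapse_bombs n m bombs → Spec_collapse_bombs n m bombs (collapse_bombs n m bombs)

-- ===== LEMMAS AND PROOFS =====

-- expansion of a (bottom-first) run list
def pvFlat (L : List (Int × Int)) : List Int := L.flatMap (fun p => List.replicate p.2.toNat p.1)

-- invariant for B's run stack: adjacent run values differ, every count c has 1 ≤ c < m
def pvGood (m : Int) (L : List (Int × Int)) : Prop :=
  List.IsChain (fun p q : Int × Int => p.1 ≠ q.1) L ∧ ∀ p ∈ L, 1 ≤ p.2 ∧ p.2 < m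

theorem pvFlat_nil : pvFlat [] = [] := rfl

theorem pvFlat_cons (p : Int × Int) (L : List (Int × Int)) :
    pvFlat (p :: L) = List.replicate p.2.toNat p.1 ++ pvFlat L := rfl

theorem pvFlat_append (L₁ L₂ : List (Int × Int)) :
    pvFlat (L₁ ++ L₂) = pvFlat L₁ ++ pvFlat L₂ := by
  simp [pvFlat]

theorem pvFlat_head_cons (p : Int × Int) (L : List (Int × Int)) (hp : 1 ≤ p.2) :
    (pvFlat (p :: L)).head? = some p.1 := by
  rw [pvFlat_cons]
  have hk : p.2.toNat = (p.2.toNat - 1) + 1 := by omega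
  rw [hk, List.replicate_succ]
  simp

theorem takeWhile_replicate_append (v : Int) (k : Nat) (ys : List Int)
    (h : ∀ w, ys.head? = some w → w ≠ v) :
    List.takeWhile (fun y => y == v) (List.replicate k v ++ ys) = List.replicate k v := by
  induction k with
  | zero =>
    simp only [List.replicate, List.nil_append]
    cases ys with
    | nil => rfl
    | cons w ws =>
      have := h w rfl
      simp [this]
  | succ k ih => simp [List.replicate_succ, ih]

theorem dropWhile_replicate_append (v : Int) (k : Nat) (ys : List Int)
    (h : ∀ w, ys.head? = some w → w ≠ v) :
    List.dropWhile (fun y => y == v) (List.replicate k v ++ ys) = ys := by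
  induction k with
  | zero =>
    simp only [List.replicate, List.nil_append]
    cases ys with
    | nil => rfl
    | cons w ws =>
      have := h w rfl
      simp [this]
  | succ k ih => simp [List.replicate_succ, ih]

-- one pass of A over an expanded run list removes exactly the runs with count ≥ m
theorem pvPassA_flat (m : Int) (L : List (Int × Int))
    (hch : List.IsChain (fun p q : Int × Int => p.1 ≠ q.1) L)
    (hc : ∀ p ∈ L, 1 ≤ p.2) :
    pvPassA m (pvFlat L) = pvFlat (L.filter (fun p => decide (p.2 < m))) := by
  induction L with
  | nil => simp [pvFlat, pvPassA]
  | cons p L ih =>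
    obtain ⟨v, c⟩ := p
    have hc1 : (1:Int) ≤ c := hc (v, c) (by simp)
    have hcL : ∀ q ∈ L, 1 ≤ q.2 := fun q hq => hc q (by simp [hq])
    have hchL : List.IsChain (fun p q : Int × Int => p.1 ≠ q.1) L := hch.tail
    have hhead : ∀ w, (pvFlat L).head? = some w → w ≠ v := by
      intro w hw
      cases L with
      | nil => simp [pvFlat_nil] at hw
      | cons r L' =>
        rw [pvFlat_head_cons r L' (hcL r (by simp))] at hw
        have hne : (v, c).1 ≠ r.1 := (List.isChain_cons.mp hch).1 r rfl
        simp at hw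
        subst hw
        exact fun e => hne e.symm
    have hk : c.toNat = (c.toNat - 1) + 1 := by omega
    have heq : List.replicate c.toNat v ++ pvFlat L
        = v :: (List.replicate (c.toNat - 1) v ++ pvFlat L) := by
      conv_lhs => rw [hk]
      rw [List.replicate_succ, List.cons_append]
    rw [pvFlat_cons, heq, pvPassA_cons]
    rw [← heq]
    rw [takeWhile_replicate_append v c.toNat (pvFlat L) hhead,
        dropWhile_replicate_append v c.toNat (pvFlat L) hhead]
    have hcast : ((List.replicate c.toNat v).length : Int) = c := by
      simp [Int.toNat_of_nonneg (by omega : (0:Int) ≤ c)]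
    rw [hcast]
    by_cases hcm : c ≥ m
    · rw [if_pos hcm]
      rw [List.filter_cons]
      simp only [show ¬((v,c).2 < m) by simpa using by omega, decide_false, if_false]
      · exact ih hchL hcL
    · rw [if_neg hcm]
      rw [List.filter_cons]
      simp only [show ((v,c).2 < m) by simpa using by omega, decide_true, if_true]
      rw [pvFlat_cons, ih hchL hcL]

theorem pvFilter_good (m : Int) (L : List (Int × Int)) (hc : ∀ p ∈ L, p.2 < m) :
    L.filter (fun p => decide (p.2 < m)) = L :=
  List.filter_eq_self.mpr (fun p hp => by simpa using hc p hp)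

theorem pvLoopA_eq (m : Int) (stack : List Int) :
    pvLoopA m stack
      = if (pvPassA m stack).length = stack.length then stack
        else pvLoopA m (pvPassA m stack) := by
  rw [pvLoopA]

-- a good stack is a fixpoint of A's while-loop
theorem pvLoopA_fix (m : Int) (L : List (Int × Int)) (h : pvGood m L) :
    pvLoopA m (pvFlat L) = pvFlat L := by
  rw [pvLoopA_eq, pvPassA_flat m L h.1 (fun p hp => (h.2 p hp).1),
      pvFilter_good m L (fun p hp => (h.2 p hp).2), if_pos rfl]

-- popping the saturated top run: one pass removes it, the next pass is a fixpoint
theorem pvLoopA_pop (m : Int) (L : List (Int × Int)) (v c : Int)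
    (hL : pvGood m L)
    (hch : List.IsChain (fun p q : Int × Int => p.1 ≠ q.1) (L ++ [(v, c)]))
    (hc1 : 1 ≤ c) (hcm : c ≥ m) :
    pvLoopA m (pvFlat (L ++ [(v, c)])) = pvFlat L := by
  have hcall : ∀ p ∈ L ++ [(v, c)], 1 ≤ p.2 := by
    intro p hp
    rcases List.mem_append.mp hp with h1 | h1
    · exact (hL.2 p h1).1
    · simp at h1; subst h1; simpa using hc1
  have hpass : pvPassA m (pvFlat (L ++ [(v, c)])) = pvFlat L := by
    rw [pvPassA_flat m _ hch hcall, List.filter_append,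
        pvFilter_good m L (fun p hp => (hL.2 p hp).2)]
    simp [show ¬(c < m) by omega]
  rw [pvLoopA_eq, hpass]
  have hlen : (pvFlat L).length ≠ (pvFlat (L ++ [(v, c)])).length := by
    rw [pvFlat_append]
    simp only [List.length_append]
    have : (pvFlat [(v, c)]).length = c.toNat := by simp [pvFlat]
    omega
  rw [if_neg hlen]
  exact pvLoopA_fix m L hL

-- appending one bomb to a good RLE stack: A's loop agrees with B's step, invariant preserved
theorem pvStep_main (m : Int) (S : List (Int × Int)) (b : Int) (h : pvGood m S) :
    pvLoopA m (pvFlat S ++ [b]) = pvFlat (pvStepB m S b) ∧ pvGood m (pvStepB m S b) := by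
  rcases List.eq_nil_or_concat S with hS | ⟨L, ⟨v, c⟩, hS⟩
  · subst hS
    have hstep : pvStepB m [] b = if (1:Int) ≥ m then [] else [(b, 1)] := by
      simp only [pvStepB, List.getLast?_nil]
      simp [List.getLast?_singleton]
    by_cases hm : (1:Int) ≥ m
    · -- m ≤ 1: the single bomb explodes immediately
      have hpass : pvPassA m [b] = [] := by
        have : pvPassA m [b] = pvPassA m ([b].dropWhile (fun y => y == b)) := by
          rw [pvPassA.eq_def]
          simp [List.takeWhile_cons, hm]
        simpa [List.dropWhile_cons, pvPassA] using this
      constructor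
      · rw [pvFlat_nil, List.nil_append, pvLoopA_eq, hpass]
        rw [if_neg (by simp)]
        rw [pvLoopA_eq]
        simp [pvPassA, hstep, hm, pvFlat_nil]
      · rw [hstep, if_pos hm]
        exact ⟨List.isChain_nil, by simp⟩
    · -- m ≥ 2: the bomb stays as a new run of count 1
      have hgood : pvGood m [(b, 1)] := ⟨List.isChain_singleton _, by intro p hp; simp at hp; subst hp; constructor <;> simp <;> omega⟩
      constructor
      · rw [pvFlat_nil, List.nil_append]
        have : pvFlat [(b, 1)] = [b] := by simp [pvFlat]
        rw [hstep, if_neg hm, this, ← this, pvLoopA_fix m [(b, 1)] hgood]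
      · rw [hstep, if_neg hm]; exact hgood
  · rw [List.concat_eq_append] at hS
    subst hS
    have hgoodL : pvGood m L := ⟨h.1.prefix (List.prefix_append _ _), fun p hp => h.2 p (by simp [hp])⟩
    have hvC : 1 ≤ c ∧ c < m := h.2 (v, c) (by simp)
    have hm2 : (2:Int) ≤ m := by omega
    have hlast : (L ++ [(v, c)]).getLast? = some (v, c) := by simp
    have hdrop : (L ++ [(v, c)]).dropLast = L := by simp
    by_cases hvb : v = b
    · subst hvb
      -- grow the top run to c+1
      have hflat : pvFlat (L ++ [(v, c)]) ++ [v] = pvFlat (L ++ [(v, c + 1)]) := by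
        rw [pvFlat_append, pvFlat_append, List.append_assoc]
        congr 1
        simp only [pvFlat, List.flatMap_cons, List.flatMap_nil, List.append_nil]
        have : (c + 1).toNat = c.toNat + 1 := by omega
        rw [this, List.replicate_succ']
      have hch' : List.IsChain (fun p q : Int × Int => p.1 ≠ q.1) (L ++ [(v, c + 1)]) := by
        rcases List.isChain_append.mp h.1 with ⟨h1, h2, h3⟩
        exact List.isChain_append.mpr ⟨h1, by simp, by simpa using h3⟩
      have hstep : pvStepB m (L ++ [(v, c)]) v
          = if c + 1 ≥ m then L else L ++ [(v, c + 1)] := by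
        simp only [pvStepB, hlast, hdrop, if_pos rfl]
        simp
      by_cases hcm : c + 1 ≥ m
      · constructor
        · rw [hflat, hstep, if_pos hcm]
          exact pvLoopA_pop m L v (c + 1) hgoodL hch' (by omega) hcm
        · rw [hstep, if_pos hcm]; exact hgoodL
      · have hgood' : pvGood m (L ++ [(v, c + 1)]) := by
          refine ⟨hch', ?_⟩
          intro p hp
          rcases List.mem_append.mp hp with h1 | h1
          · exact hgoodL.2 p h1
          · simp at h1; subst h1; constructor <;> simp <;> omega
        constructor
        · rw [hflat, hstep, if_neg hcm]
          exact pvLoopA_fix m _ hgood'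
        · rw [hstep, if_neg hcm]; exact hgood'
    · -- a fresh run of count 1 on top
      have hflat : pvFlat (L ++ [(v, c)]) ++ [b] = pvFlat (L ++ [(v, c)] ++ [(b, 1)]) := by
        rw [pvFlat_append (L ++ [(v, c)])]
        congr 1
      have hch' : List.IsChain (fun p q : Int × Int => p.1 ≠ q.1) (L ++ [(v, c)] ++ [(b, 1)]) := by
        refine List.isChain_append.mpr ⟨h.1, by simp, ?_⟩
        intro x hx y hy
        rw [hlast] at hx
        simp at hx hy
        subst hx; subst hy
        simpa using hvb
      have hgood' : pvGood m (L ++ [(v, c)] ++ [(b, 1)]) := by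
        refine ⟨hch', ?_⟩
        intro p hp
        rcases List.mem_append.mp hp with h1 | h1
        · exact h.2 p h1
        · simp at h1; subst h1; constructor <;> simp <;> omega
      have hstep : pvStepB m (L ++ [(v, c)]) b = L ++ [(v, c)] ++ [(b, 1)] := by
        simp only [pvStepB, hlast, if_neg hvb]
        have : (L ++ [(v, c)] ++ [(b, 1)]).getLast? = some (b, 1) := by simp
        simp only [this]
        rw [if_neg (by omega)]
      constructor
      · rw [hflat, hstep]
        exact pvLoopA_fix m _ hgood'
      · rw [hstep]; exact hgood'

-- the fold invariant: A's stack is always the expansion of B's run stack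
theorem pvFold_inv (m : Int) (bombs : List Int) :
    ∀ S : List (Int × Int), pvGood m S →
      bombs.foldl (fun stack bomb => pvLoopA m (stack ++ [bomb])) (pvFlat S)
          = pvFlat (bombs.foldl (pvStepB m) S)
        ∧ pvGood m (bombs.foldl (pvStepB m) S) := by
  induction bombs with
  | nil => intro S hS; exact ⟨rfl, hS⟩
  | cons b bs ih =>
    intro S hS
    obtain ⟨h1, h2⟩ := pvStep_main m S b hS
    simp only [List.foldl_cons]
    rw [h1]
    exact ih (pvStepB m S b) h2

-- ===== VERDICT (by name: the statement is the Claim_ definition above) =====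
theorem collapse_bombs_spec : Claim_equal_collapse_bombs := by
  intro n m bombs _
  unfold Spec_collapse_bombs collapse_bombs collapse_bombs_alt
  have h := (pvFold_inv m bombs [] ⟨by simp, by simp⟩).1
  simpa [pvFlat] using h
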